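-- pv_equiv track=rewrite | github.com/XinnuoXu/Highlight_based_Summarization | Document_highlight.GloVE/script/context_selection_fact.py | doc_fact_mapping
-- ===== SOURCE A (Python) =====
-- def label_classify(item):
--     if item[0] == '(':
--         if item[1] == 'F':
--             return "fact"
--         else:
--             return "phrase"
--     elif item[0] == ')':
--         return "end"
--     elif item[0] == '*':
--         return "reference"
--     return "token"
--
-- def doc_fact_mapping(line):
--     fact_stack = []
--     type_stack = []
--     fact_id_map = {}
--     fact_term_map = []
--     terms = []
--     fact_id = 0
--     for i, item in enumerate(line):
--         l_type = label_classify(item)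
--         if l_type in ["fact"]:
--             fact_stack.append(fact_id)
--             fact_id_map[fact_id] = fact_stack[0]
--             type_stack.append(l_type)
--             fact_id += 1
--         elif l_type in ["phrase"]:
--             type_stack.append(l_type)
--         elif l_type in ["end"]:
--             pop_type = type_stack.pop()
--             if pop_type == "fact":
--                 fact_stack.pop()
--         elif l_type not in ["reference"]:
--             fact_term_map.append([j for j in fact_stack])
--             terms.append(item)
--     return fact_term_map, terms, fact_id_map
-- ===== SOURCE B (Python) =====
-- def doc_fact_mapping(line):
--     fact_term_map = []
--     terms = []
--     fact_id_map = {}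
--     next_id = [0]
--
--     def go(i, fact_stack):
--         # process items at one nesting level; return index just past the
--         # closing ')' of this level, or None when input is exhausted
--         while i < len(line):
--             item = line[i]
--             c = item[0]
--             if c == '(':
--                 if item[1] == 'F':
--                     new_id = next_id[0]
--                     next_id[0] += 1
--                     fact_id_map[new_id] = fact_stack[0] if fact_stack else new_id
--                     r = go(i + 1, fact_stack + [new_id])
--                 else:
--                     r = go(i + 1, fact_stack)
--                 if r is None:
--                     return None
--                 i = r
--             elif c == ')':
--                 return i + 1
--             elif c == '*':
--                 i += 1
--             else:
--                 fact_term_map.append(list(fact_stack))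
--                 terms.append(item)
--                 i += 1
--         return None
--
--     if go(0, []) is not None:
--         # a ')' with no matching opener reached nesting depth 0
--         raise IndexError("unmatched ')'")
--     return fact_term_map, terms, fact_id_map
-- ===== Notes on version B (the rewrite author's own statement) =====
-- stated objective: alternative
-- what changed: Replaced A's single loop with explicit fact/type stacks by a recursive-descent parser: a cursor-advancing worker that recurses on each '(F'/'(' opener and returns at the matching ')', threading the current fact stack as an argument, so the type_stack disappears entirely; like A, it raises IndexError on an unmatched ')'.
import Mathlib
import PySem

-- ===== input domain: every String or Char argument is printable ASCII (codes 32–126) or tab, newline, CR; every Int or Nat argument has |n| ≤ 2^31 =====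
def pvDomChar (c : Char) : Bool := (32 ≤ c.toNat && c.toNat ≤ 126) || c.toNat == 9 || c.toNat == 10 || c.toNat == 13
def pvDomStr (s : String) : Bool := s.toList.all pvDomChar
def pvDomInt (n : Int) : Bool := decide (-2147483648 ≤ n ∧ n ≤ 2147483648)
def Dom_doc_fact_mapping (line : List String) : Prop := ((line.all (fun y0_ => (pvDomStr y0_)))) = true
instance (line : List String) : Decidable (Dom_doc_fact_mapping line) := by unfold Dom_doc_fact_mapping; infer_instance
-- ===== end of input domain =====

-- B replaces A's explicit fact/type stacks by a recursive-descent walk over the token list; objective: alternative decomposition (same cost).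


-- ===== PORT A =====
def label_classify (item : String) : Option String :=
  match PySem.List.pyGet? item.toList 0 with
  | none => none               -- item[0] raises IndexError on ''
  | some c =>
    if c = '(' then
      match PySem.List.pyGet? item.toList 1 with
      | none => none           -- item[1] raises IndexError on '('
      | some c1 => if c1 = 'F' then some "fact" else some "phrase"
    else if c = ')' then some "end"
    else if c = '*' then some "reference"
    else some "token"

/-- A's loop over `line`; `none` = the Python raised (IndexError from pop on an
empty stack or from `label_classify`). State: fact_stack, type_stack,
fact_id_map, fact_term_map, terms, fact_id. -/
def aLoop : List String → List Int → List String → PySem.Dict Int Int →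
    List (List Int) → List String → Int →
    Option (PySem.Dict Int Int × List (List Int) × List String × Int)
  | [], _, _, m, ftm, terms, fid => some (m, ftm, terms, fid)
  | item :: rest, fs, ts, m, ftm, terms, fid =>
    match label_classify item with
    | none => none
    | some t =>
      if t = "fact" then
        match PySem.List.pyGet? (fs ++ [fid]) 0 with
        | none => none         -- unreachable: fact_stack[0] after append
        | some root =>
          aLoop rest (fs ++ [fid]) (ts ++ [t]) (m.insert fid root) ftm terms (fid + 1)
      else if t = "phrase" then aLoop rest fs (ts ++ [t]) m ftm terms fid
      else if t = "end" then
        match PySem.List.pop? ts (-1) with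
        | none => none         -- type_stack.pop() on empty: IndexError
        | some (pt, ts') =>
          if pt = "fact" then
            match PySem.List.pop? fs (-1) with
            | none => none
            | some (_, fs') => aLoop rest fs' ts' m ftm terms fid
          else aLoop rest fs ts' m ftm terms fid
      else if t = "reference" then aLoop rest fs ts m ftm terms fid
      else aLoop rest fs ts m (ftm ++ [fs.map (fun j => j)]) (terms ++ [item]) fid

def doc_fact_mapping (line : List String) : List (List Int) × List String × (List (Int × Int)) :=
  match aLoop line [] [] PySem.Dict.empty [] [] 0 with
  | none => ([], [], [])       -- the Python raised; never reached under Pre_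
  | some (m, ftm, terms, _) => (ftm, terms, m.items)

-- ===== PORT B =====
/-- B's `fact_stack[0] if fact_stack else new_id`. -/
def pvRoot (fs : List Int) (nid : Int) : Int :=
  match fs with | [] => nid | r0 :: _ => r0

/-- B's recursive-descent worker `go`: processes the suffix `l` at one nesting
level with current fact stack `fs` and shared state (fact_id_map,
fact_term_map, terms, next_id).  Result: outer `none` = raise (bad item);
`some (some r, st)` = returned past a `')'` with suffix `r` remaining;
`some (none, st)` = input exhausted. The subtype bound is only for termination. -/
def goB : (l : List String) → List Int → (PySem.Dict Int Int × List (List Int) × List String × Int) →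
    Option (Option {r : List String // r.length ≤ l.length} × (PySem.Dict Int Int × List (List Int) × List String × Int))
  | [], _, st => some (none, st)
  | item :: rest, fs, st =>
    match PySem.List.pyGet? item.toList 0 with
    | none => none
    | some c =>
      if c = '(' then
        match PySem.List.pyGet? item.toList 1 with
        | none => none
        | some c1 =>
          match (if c1 = 'F' then
                   goB rest (fs ++ [st.2.2.2])
                     (st.1.insert st.2.2.2 (pvRoot fs st.2.2.2),
                      st.2.1, st.2.2.1, st.2.2.2 + 1)
                 else goB rest fs st) with
          | none => none
          | some (none, st') => some (none, st')
          | some (some r1, st') =>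
            match goB r1.val fs st' with
            | none => none
            | some (none, st'') => some (none, st'')
            | some (some r2, st'') =>
              some (some ⟨r2.val, Nat.le_succ_of_le (Nat.le_trans r2.2 r1.2)⟩, st'')
      else if c = ')' then some (some ⟨rest, Nat.le_succ _⟩, st)
      else if c = '*' then
        match goB rest fs st with
        | none => none
        | some (none, st') => some (none, st')
        | some (some r1, st') => some (some ⟨r1.val, Nat.le_succ_of_le r1.2⟩, st')
      else
        match goB rest fs (st.1, st.2.1 ++ [fs], st.2.2.1 ++ [item], st.2.2.2) with
        | none => none
        | some (none, st') => some (none, st')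
        | some (some r1, st') => some (some ⟨r1.val, Nat.le_succ_of_le r1.2⟩, st')
  termination_by l => l.length
  decreasing_by
  all_goals first
    | (simp; done)
    | (have := r1.2; simp; omega)

def doc_fact_mapping_alt (line : List String) : List (List Int) × List String × (List (Int × Int)) :=
  match goB line [] (PySem.Dict.empty, [], [], 0) with
  | none => ([], [], [])            -- the Python raised; never reached under Pre_
  | some (some _, _) => ([], [], []) -- unmatched ')' at depth 0: B raises IndexError; never reached under Pre_
  | some (none, (m, ftm, terms, _)) => (ftm, terms, m.items)

-- ===== PRECONDITION & SPEC =====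
-- Pre_ excludes exactly the inputs on which the Python programs raise IndexError: an
-- empty item, an item "(" with nothing after the bracket, or a prefix with more
-- ")"-items than "("-items (A: pop from an empty type_stack; B: unmatched ')').
def Pre_doc_fact_mapping (line : List String) : Prop :=
  (∀ s ∈ line, s.toList ≠ [] ∧ (s.toList.head? = some '(' → 2 ≤ s.toList.length)) ∧
  (∀ i ∈ List.range (line.length + 1),
    (line.take i).countP (fun s => s.toList.head? == some ')') ≤
    (line.take i).countP (fun s => s.toList.head? == some '('))
instance (line : List String) : Decidable (Pre_doc_fact_mapping line) := by
  unfold Pre_doc_fact_mapping; infer_instance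

def pvWitness_doc_fact_mapping : List String := ["(Fact", "the", "(NP", "cat", ")", "*r", ")", "sat"]

def Spec_doc_fact_mapping (line : List String) (out : List (List Int) × List String × (List (Int × Int))) : Prop := out = doc_fact_mapping_alt line
instance (line : List String) (out : List (List Int) × List String × (List (Int × Int))) : Decidable (Spec_doc_fact_mapping line out) := by unfold Spec_doc_fact_mapping; infer_instance

-- ===== CLAIM (what is proved, stated in full; the proofs are below) =====
def Claim_equal_doc_fact_mapping : Prop := ∀ (line : List String), Dom_doc_fact_mapping line → Pre_doc_fact_mapping line → Spec_doc_fact_mapping line (doc_fact_mapping line)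

-- ===== LEMMAS AND PROOFS =====

theorem pv_goB_close : ∀ (n : Nat) (l : List String), l.length ≤ n →
    ∀ fs st r st', goB l fs st = some (some r, st') →
    ∃ p, l = p ++ r.val ∧
      p.countP (fun s => s.toList.head? == some ')') =
      p.countP (fun s => s.toList.head? == some '(') + 1 := by
  intro n
  induction n with
  | zero =>
    intro l hl fs st r st' h
    have : l = [] := List.eq_nil_of_length_eq_zero (Nat.le_zero.mp hl)
    subst this; simp [goB] at h
  | succ n ih =>
    intro l hl fs st r st' h
    cases l with
    | nil => simp [goB] at h
    | cons item rest =>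
      have hlr : rest.length ≤ n := by simpa using hl
      rw [goB.eq_def] at h
      dsimp only at h
      rcases htl : item.toList with _ | ⟨a, tl⟩
      · rw [htl] at h; simp [PySem.List.pyGet?, PySem.List.pyIdx?] at h
      · rw [htl, PySem.List.pyGet?_zero_cons] at h
        simp only [] at h
        by_cases hop : a = '('
        · subst hop
          rw [if_pos rfl] at h
          rcases hc1 : PySem.List.pyGet? ('(' :: tl) 1 with _ | c1
          · rw [hc1] at h; exact absurd h (by simp)
          · rw [hc1] at h
            simp only [] at h
            by_cases hF : c1 = 'F'
            · rw [if_pos hF] at h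
              rcases hres : goB rest (fs ++ [st.2.2.2])
                    (st.1.insert st.2.2.2 (pvRoot fs st.2.2.2),
                     st.2.1, st.2.2.1, st.2.2.2 + 1) with _ | ⟨o1, st1⟩
              all_goals rw [hres] at h
              · exact absurd h (by simp)
              · cases o1 with
                | none => simp at h
                | some r1 =>
                  simp only [] at h
                  rcases h2 : goB r1.val fs st1 with _ | ⟨o2, st2⟩
                  · rw [h2] at h; exact absurd h (by simp)
                  · rw [h2] at h
                    cases o2 with
                    | none => simp at h
                    | some r2 =>
                      simp only [Option.some.injEq, Prod.mk.injEq] at h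
                      obtain ⟨hr, hst⟩ := h
                      have hrv : r.val = r2.val := by rw [← hr]
                      obtain ⟨p1, he1, hc1'⟩ := ih rest hlr _ _ _ _ hres
                      obtain ⟨p2, he2, hc2'⟩ := ih r1.val (Nat.le_trans r1.2 hlr) _ _ _ _ h2
                      refine ⟨item :: (p1 ++ p2), ?_, ?_⟩
                      · simp [he1, he2, hrv]
                      · simp only [List.countP_cons, List.countP_append, htl] at *
                        simp at *
                        omega
            · rw [if_neg hF] at h
              rcases hres : goB rest fs st with _ | ⟨o1, st1⟩
              all_goals rw [hres] at h
              · exact absurd h (by simp)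
              · cases o1 with
                | none => simp at h
                | some r1 =>
                  simp only [] at h
                  rcases h2 : goB r1.val fs st1 with _ | ⟨o2, st2⟩
                  · rw [h2] at h; exact absurd h (by simp)
                  · rw [h2] at h
                    cases o2 with
                    | none => simp at h
                    | some r2 =>
                      simp only [Option.some.injEq, Prod.mk.injEq] at h
                      obtain ⟨hr, hst⟩ := h
                      have hrv : r.val = r2.val := by rw [← hr]
                      obtain ⟨p1, he1, hc1'⟩ := ih rest hlr _ _ _ _ hres
                      obtain ⟨p2, he2, hc2'⟩ := ih r1.val (Nat.le_trans r1.2 hlr) _ _ _ _ h2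
                      refine ⟨item :: (p1 ++ p2), ?_, ?_⟩
                      · simp [he1, he2, hrv]
                      · simp only [List.countP_cons, List.countP_append, htl] at *
                        simp at *
                        omega
        · rw [if_neg hop] at h
          by_cases hcl : a = ')'
          · subst hcl
            rw [if_pos rfl] at h
            simp only [Option.some.injEq, Prod.mk.injEq] at h
            obtain ⟨hr, hst⟩ := h
            have hrv : r.val = rest := by rw [← hr]
            refine ⟨[item], by simp [hrv], ?_⟩
            simp [htl]
          · rw [if_neg hcl] at h
            by_cases hst : a = '*'
            · rw [if_pos hst] at h
              rcases hres : goB rest fs st with _ | ⟨o1, st1⟩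
              all_goals rw [hres] at h
              · exact absurd h (by simp)
              · cases o1 with
                | none => simp at h
                | some r1 =>
                  simp only [Option.some.injEq, Prod.mk.injEq] at h
                  obtain ⟨hr, hst'⟩ := h
                  have hrv : r.val = r1.val := by rw [← hr]
                  obtain ⟨p1, he1, hc1'⟩ := ih rest hlr _ _ _ _ hres
                  refine ⟨item :: p1, by simp [he1, hrv], ?_⟩
                  simp only [List.countP_cons, htl] at *
                  simp [hop, hcl] at *
                  omega
            · rw [if_neg hst] at h
              rcases hres : goB rest fs (st.1, st.2.1 ++ [fs], st.2.2.1 ++ [item], st.2.2.2) with _ | ⟨o1, st1⟩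
              all_goals rw [hres] at h
              · exact absurd h (by simp)
              · cases o1 with
                | none => simp at h
                | some r1 =>
                  simp only [Option.some.injEq, Prod.mk.injEq] at h
                  obtain ⟨hr, hst'⟩ := h
                  have hrv : r.val = r1.val := by rw [← hr]
                  obtain ⟨p1, he1, hc1'⟩ := ih rest hlr _ _ _ _ hres
                  refine ⟨item :: p1, by simp [he1, hrv], ?_⟩
                  simp only [List.countP_cons, htl] at *
                  simp [hop, hcl] at *
                  omega

theorem pv_goB_ne_none : ∀ (n : Nat) (l : List String), l.length ≤ n →
    (∀ s ∈ l, s.toList ≠ [] ∧ (s.toList.head? = some '(' → 2 ≤ s.toList.length)) →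
    ∀ fs st, goB l fs st ≠ none := by
  intro n
  induction n with
  | zero =>
    intro l hl _ fs st
    have : l = [] := List.eq_nil_of_length_eq_zero (Nat.le_zero.mp hl)
    subst this; simp [goB]
  | succ n ih =>
    intro l hl hwf fs st
    cases l with
    | nil => simp [goB]
    | cons item rest =>
      obtain ⟨h0, h1⟩ := hwf item (by simp)
      have hwr : ∀ s ∈ rest, s.toList ≠ [] ∧ (s.toList.head? = some '(' → 2 ≤ s.toList.length) :=
        fun s hs => hwf s (by simp [hs])
      have hlr : rest.length ≤ n := by simpa using hl
      rw [goB.eq_def]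
      dsimp only
      rcases htl : item.toList with _ | ⟨a, tl⟩
      · exact absurd htl h0
      · rw [PySem.List.pyGet?_zero_cons]
        simp only []
        by_cases hop : a = '('
        · subst hop
          have h2 : 2 ≤ item.toList.length := h1 (by rw [htl]; rfl)
          rw [htl] at h2
          cases tl with
          | nil => simp at h2
          | cons b tl2 =>
            rw [if_pos rfl]
            have hb : PySem.List.pyGet? ('(' :: b :: tl2) 1 = some b := by
              simp [PySem.List.pyGet?, PySem.List.pyIdx?]
            rw [hb]
            simp only []
            by_cases hF : b = 'F'
            · rw [if_pos hF]
              rcases hres : goB rest (fs ++ [st.2.2.2])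
                    (st.1.insert st.2.2.2 (pvRoot fs st.2.2.2),
                     st.2.1, st.2.2.1, st.2.2.2 + 1) with _ | ⟨o1, st1⟩
              · exact absurd hres (ih rest hlr hwr _ _)
              · cases o1 with
                | none => simp
                | some r1 =>
                  simp only []
                  obtain ⟨p1, he1, -⟩ := pv_goB_close n rest hlr _ _ _ _ hres
                  have hwr1 : ∀ s ∈ r1.val, s.toList ≠ [] ∧ (s.toList.head? = some '(' → 2 ≤ s.toList.length) :=
                    fun s hs => hwr s (by rw [he1]; exact List.mem_append_right _ hs)
                  rcases h2' : goB r1.val fs st1 with _ | ⟨o2, st2⟩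
                  · exact absurd h2' (ih r1.val (Nat.le_trans r1.2 hlr) hwr1 _ _)
                  · cases o2 with
                    | none => simp
                    | some r2 => simp
            · rw [if_neg hF]
              rcases hres : goB rest fs st with _ | ⟨o1, st1⟩
              · exact absurd hres (ih rest hlr hwr _ _)
              · cases o1 with
                | none => simp
                | some r1 =>
                  simp only []
                  obtain ⟨p1, he1, -⟩ := pv_goB_close n rest hlr _ _ _ _ hres
                  have hwr1 : ∀ s ∈ r1.val, s.toList ≠ [] ∧ (s.toList.head? = some '(' → 2 ≤ s.toList.length) :=
                    fun s hs => hwr s (by rw [he1]; exact List.mem_append_right _ hs)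
                  rcases h2' : goB r1.val fs st1 with _ | ⟨o2, st2⟩
                  · exact absurd h2' (ih r1.val (Nat.le_trans r1.2 hlr) hwr1 _ _)
                  · cases o2 with
                    | none => simp
                    | some r2 => simp
        · rw [if_neg hop]
          by_cases hcl : a = ')'
          · rw [if_pos hcl]; simp
          · rw [if_neg hcl]
            by_cases hst : a = '*'
            · rw [if_pos hst]
              rcases hres : goB rest fs st with _ | ⟨o1, st1⟩
              · exact absurd hres (ih rest hlr hwr _ _)
              · cases o1 with
                | none => simp
                | some r1 => simp
            · rw [if_neg hst]
              rcases hres : goB rest fs (st.1, st.2.1 ++ [fs], st.2.2.1 ++ [item], st.2.2.2) with _ | ⟨o1, st1⟩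
              · exact absurd hres (ih rest hlr hwr _ _)
              · cases o1 with
                | none => simp
                | some r1 => simp

def pvTags (fr : List (Option Int)) : List String :=
  fr.map (fun f => match f with | some _ => "fact" | none => "phrase")

def pvFids (fr : List (Option Int)) : List Int := fr.filterMap (fun f => f)

theorem pv_main : ∀ (n : Nat) (l : List String), l.length ≤ n →
    ∀ (fr : List (Option Int)) m ftm terms fid,
    aLoop l (pvFids fr) (pvTags fr) m ftm terms fid =
      match goB l (pvFids fr) (m, ftm, terms, fid) with
      | none => none
      | some (none, st') => some st'
      | some (some r, st') =>
        match fr.getLast? with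
        | none => none
        | some _ =>
          aLoop r.val (pvFids fr.dropLast) (pvTags fr.dropLast) st'.1 st'.2.1 st'.2.2.1 st'.2.2.2 := by
  intro n
  induction n with
  | zero =>
    intro l hl fr m ftm terms fid
    have : l = [] := List.eq_nil_of_length_eq_zero (Nat.le_zero.mp hl)
    subst this; simp [aLoop, goB]
  | succ n ih =>
    intro l hl fr m ftm terms fid
    cases l with
    | nil => simp [aLoop, goB]
    | cons item rest =>
      have hlr : rest.length ≤ n := by simpa using hl
      rw [aLoop.eq_def, goB.eq_def]
      dsimp only
      rcases htl : item.toList with _ | ⟨a, tl⟩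
      · simp [label_classify, htl, PySem.List.pyGet?, PySem.List.pyIdx?]
      · rw [PySem.List.pyGet?_zero_cons]
        simp only []
        by_cases hop : a = '('
        · subst hop
          rw [if_pos rfl]
          cases tl with
          | nil =>
            have hlab : label_classify item = none := by
              simp [label_classify, htl, PySem.List.pyGet?, PySem.List.pyIdx?]
            rw [hlab]
            have hb : PySem.List.pyGet? ('(' :: ([] : List Char)) 1 = none := by decide
            rw [hb]
          | cons b tl2 =>
            have hb : PySem.List.pyGet? ('(' :: b :: tl2) 1 = some b := by
              simp [PySem.List.pyGet?, PySem.List.pyIdx?]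
            rw [hb]
            simp only []
            by_cases hF : b = 'F'
            · -- a fact opener
              subst hF
              have hlab : label_classify item = some "fact" := by
                simp [label_classify, htl, PySem.List.pyGet?_zero_cons]
              rw [hlab, if_pos rfl]
              simp only [String.reduceEq, reduceIte]
              have hroot : PySem.List.pyGet? (pvFids fr ++ [fid]) 0 = some (pvRoot (pvFids fr) fid) := by
                cases hfs : pvFids fr <;> simp [PySem.List.pyGet?_zero_cons, pvRoot]
              rw [hroot]
              simp only []
              have e1 : pvFids (fr ++ [some fid]) = pvFids fr ++ [fid] := by simp [pvFids]
              have e2 : pvTags (fr ++ [some fid]) = pvTags fr ++ ["fact"] := by simp [pvTags]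
              have IH := ih rest hlr (fr ++ [some fid]) (m.insert fid (pvRoot (pvFids fr) fid)) ftm terms (fid + 1)
              rw [e1, e2, List.getLast?_concat, List.dropLast_concat] at IH
              rw [IH]
              rcases hres : goB rest (pvFids fr ++ [fid])
                  (m.insert fid (pvRoot (pvFids fr) fid), ftm, terms, fid + 1) with _ | ⟨o1, st1⟩
              · rfl
              · cases o1 with
                | none => rfl
                | some r1 =>
                  simp only []
                  obtain ⟨m1, ftm1, terms1, fid1⟩ := st1
                  have IH2 := ih r1.val (Nat.le_trans r1.2 hlr) fr m1 ftm1 terms1 fid1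
                  rw [IH2]
                  rcases h2 : goB r1.val (pvFids fr) (m1, ftm1, terms1, fid1) with _ | ⟨o2, st2⟩
                  · rfl
                  · cases o2 with
                    | none => rfl
                    | some r2 => rfl
            · -- a phrase opener
              have hlab : label_classify item = some "phrase" := by
                simp [label_classify, htl, hF, PySem.List.pyGet?_zero_cons]
              rw [hlab, if_neg hF]
              simp only [String.reduceEq, reduceIte]
              have e1 : pvFids (fr ++ [none]) = pvFids fr := by simp [pvFids]
              have e2 : pvTags (fr ++ [none]) = pvTags fr ++ ["phrase"] := by simp [pvTags]
              have IH := ih rest hlr (fr ++ [none]) m ftm terms fid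
              rw [e1, e2, List.getLast?_concat, List.dropLast_concat] at IH
              rw [IH]
              rcases hres : goB rest (pvFids fr) (m, ftm, terms, fid) with _ | ⟨o1, st1⟩
              · rfl
              · cases o1 with
                | none => rfl
                | some r1 =>
                  simp only []
                  obtain ⟨m1, ftm1, terms1, fid1⟩ := st1
                  have IH2 := ih r1.val (Nat.le_trans r1.2 hlr) fr m1 ftm1 terms1 fid1
                  rw [IH2]
                  rcases h2 : goB r1.val (pvFids fr) (m1, ftm1, terms1, fid1) with _ | ⟨o2, st2⟩
                  · rfl
                  · cases o2 with
                    | none => rfl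
                    | some r2 => rfl
        · rw [if_neg hop]
          by_cases hcl : a = ')'
          · -- a closing bracket
            subst hcl
            rw [if_pos rfl]
            have hlab : label_classify item = some "end" := by
              simp [label_classify, htl, hop]
            rw [hlab]
            simp only [String.reduceEq, reduceIte]
            rcases List.eq_nil_or_concat fr with rfl | ⟨fr', f, rfl⟩
            · have hpop : PySem.List.pop? (pvTags ([] : List (Option Int))) (-1) = none := by
                simp [pvTags, PySem.List.pop?, PySem.List.pyIdx?]
              rw [hpop]
              rfl
            · simp only [List.concat_eq_append]
              have e2 : pvTags (fr' ++ [f]) = pvTags fr' ++ [match f with | some _ => "fact" | none => "phrase"] := by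
                simp [pvTags]
              rw [e2, PySem.List.pop?_last]
              simp only []
              cases f with
              | some idv =>
                rw [if_pos rfl]
                have e1 : pvFids (fr' ++ [some idv]) = pvFids fr' ++ [idv] := by simp [pvFids]
                rw [e1, PySem.List.pop?_last]
                simp only [List.getLast?_concat, List.dropLast_concat]
              | none =>
                rw [if_neg (by decide)]
                have e1 : pvFids (fr' ++ [none]) = pvFids fr' := by simp [pvFids]
                rw [e1]
                simp only [List.getLast?_concat, List.dropLast_concat]
          · rw [if_neg hcl]
            by_cases hst : a = '*'
            · -- a reference
              subst hst
              rw [if_pos rfl]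
              have hlab : label_classify item = some "reference" := by
                simp [label_classify, htl, hop, hcl]
              rw [hlab]
              simp only [String.reduceEq, reduceIte]
              have IH := ih rest hlr fr m ftm terms fid
              rw [IH]
              rcases hres : goB rest (pvFids fr) (m, ftm, terms, fid) with _ | ⟨o1, st1⟩
              · rfl
              · cases o1 with
                | none => rfl
                | some r1 => rfl
            · -- a plain token
              rw [if_neg hst]
              have hlab : label_classify item = some "token" := by
                simp [label_classify, htl, hop, hcl, hst]
              rw [hlab]
              simp only [String.reduceEq, reduceIte]
              have emap : (pvFids fr).map (fun j => j) = pvFids fr := by simp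
              rw [emap]
              have IH := ih rest hlr fr m (ftm ++ [pvFids fr]) (terms ++ [item]) fid
              rw [IH]
              rcases hres : goB rest (pvFids fr) (m, ftm ++ [pvFids fr], terms ++ [item], fid) with _ | ⟨o1, st1⟩
              · rfl
              · cases o1 with
                | none => rfl
                | some r1 => rfl

-- ===== VERDICT (by name: the statement is the Claim_ definition above) =====
theorem doc_fact_mapping_spec : Claim_equal_doc_fact_mapping := by
  intro line _ hpre
  unfold Spec_doc_fact_mapping doc_fact_mapping doc_fact_mapping_alt
  have hm := pv_main line.length line le_rfl [] PySem.Dict.empty [] [] 0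
  simp only [pvFids, pvTags, List.filterMap_nil, List.map_nil] at hm
  rcases hgo : goB line [] (PySem.Dict.empty, [], [], 0) with _ | ⟨o, st'⟩
  · exact absurd hgo (pv_goB_ne_none line.length line le_rfl hpre.1 [] _)
  · cases o with
    | none => rw [hm, hgo]
    | some r =>
      obtain ⟨p, hp, hc⟩ := pv_goB_close line.length line le_rfl [] _ r st' hgo
      have hlen : p.length ≤ line.length := by
        rw [hp]; simp
      have hb := hpre.2 p.length (by simp [List.mem_range]; omega)
      rw [hp, List.take_left] at hb
      omega
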